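-- pv_equiv track=rewrite | github.com/mittal1787/are-we-really-load-generating | experiments/multimachine_scaling.py | even_distribution
-- ===== SOURCE A (Python) =====
-- def even_distribution(rps: int, machine_count: int, thread_count: int, conn_count: int):
--     rps_per_machine = [rps//machine_count for _ in range(machine_count)]
--     for i in range(rps % machine_count):
--         rps_per_machine[i] += 1
--     thread_per_machine = [thread_count//machine_count for _ in range(machine_count)]
--     for i in range(thread_count % machine_count):
--         thread_per_machine[i] += 1
--     conn_per_machine = [conn_count//machine_count for _ in range(machine_count)]
--     for i in range(conn_count % machine_count):
--         conn_per_machine[i] += 1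
--     return rps_per_machine, thread_per_machine, conn_per_machine
-- ===== SOURCE B (Python) =====
-- def even_distribution(rps: int, machine_count: int, thread_count: int, conn_count: int):
--     def share(total, n):
--         # greedy peel-off: each machine takes the ceiling of the remaining average
--         out = []
--         while n > 0:
--             head = -(-total // n)
--             out.append(head)
--             total -= head
--             n -= 1
--         return out
--     return (share(rps, machine_count),
--             share(thread_count, machine_count),
--             share(conn_count, machine_count))
-- ===== Notes on version B (the rewrite author's own statement) =====
-- stated objective: alternative
-- what changed: A precomputes quotient and remainder and does a two-pass build-uniform-then-increment-remainder scheme three times; B is a single greedy loop that peels off one machine at a time, giving each the ceiling of the remaining total divided by the remaining machine count.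
import Mathlib
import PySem

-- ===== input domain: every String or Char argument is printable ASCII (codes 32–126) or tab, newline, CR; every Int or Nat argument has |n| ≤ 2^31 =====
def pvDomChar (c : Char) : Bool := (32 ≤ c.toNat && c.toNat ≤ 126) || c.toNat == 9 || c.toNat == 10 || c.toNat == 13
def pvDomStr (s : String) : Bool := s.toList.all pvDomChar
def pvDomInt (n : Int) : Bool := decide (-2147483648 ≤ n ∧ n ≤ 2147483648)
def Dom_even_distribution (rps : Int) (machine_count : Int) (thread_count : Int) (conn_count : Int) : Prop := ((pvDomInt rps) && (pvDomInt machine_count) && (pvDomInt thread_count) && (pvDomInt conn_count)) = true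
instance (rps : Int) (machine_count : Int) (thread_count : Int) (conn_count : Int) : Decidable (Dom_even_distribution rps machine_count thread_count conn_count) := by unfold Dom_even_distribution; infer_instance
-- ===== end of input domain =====

-- B replaces A's build-uniform-then-increment-remainder two-pass scheme by a greedy single loop
-- that peels off one machine at a time, giving it the ceiling of the remaining average (objective: simpler).

-- ===== PORT A =====
-- A repeats the same two-pass code for rps, thread_count and conn_count; this helper is that code,
-- transliterated: build [t//m]*m, then 'for i in range(t % m): lst[i] += 1' as a foldl with List.modify
-- (indices from pyRange 0 (t%m) 1 are ≥ 0, so .toNat is exact).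
def pvDistA (t : Int) (m : Int) : List Int :=
  let base := (PySem.List.pyRange 0 m 1).map (fun _ => PySem.Int.floordiv t m)
  (PySem.List.pyRange 0 (PySem.Int.mod t m) 1).foldl (fun acc i => acc.modify i.toNat (· + 1)) base

def even_distribution (rps : Int) (machine_count : Int) (thread_count : Int) (conn_count : Int) : List Int × List Int × List Int :=
  (pvDistA rps machine_count, pvDistA thread_count machine_count, pvDistA conn_count machine_count)

-- ===== PORT B =====
-- B's while-loop, step for step: while n > 0: head = -(-total // n); out.append(head); total -= head; n -= 1
def pvShareLoop (total : Int) (n : Int) (out : List Int) : List Int :=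
  if _h : 0 < n then
    let head := -(PySem.Int.floordiv (-total) n)
    pvShareLoop (total - head) (n - 1) (out ++ [head])
  else out
termination_by n.toNat
decreasing_by omega

def even_distribution_alt (rps : Int) (machine_count : Int) (thread_count : Int) (conn_count : Int) : List Int × List Int × List Int :=
  (pvShareLoop rps machine_count [], pvShareLoop thread_count machine_count [], pvShareLoop conn_count machine_count [])

-- ===== PRECONDITION & SPEC =====
-- A raises ZeroDivisionError when machine_count == 0; Pre_ excludes exactly that.
def Pre_even_distribution (rps : Int) (machine_count : Int) (thread_count : Int) (conn_count : Int) : Prop := machine_count ≠ 0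
instance (rps : Int) (machine_count : Int) (thread_count : Int) (conn_count : Int) : Decidable (Pre_even_distribution rps machine_count thread_count conn_count) := by unfold Pre_even_distribution; infer_instance

def pvWitness_even_distribution : Int × Int × Int × Int := (10, 3, 7, 4)

def Spec_even_distribution (rps : Int) (machine_count : Int) (thread_count : Int) (conn_count : Int) (out : List Int × List Int × List Int) : Prop := out = even_distribution_alt rps machine_count thread_count conn_count
instance (rps : Int) (machine_count : Int) (thread_count : Int) (conn_count : Int) (out : List Int × List Int × List Int) : Decidable (Spec_even_distribution rps machine_count thread_count conn_count out) := by unfold Spec_even_distribution; infer_instance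

-- ===== CLAIM (what is proved, stated in full; the proofs are below) =====
def Claim_equal_even_distribution : Prop := ∀ (rps : Int) (machine_count : Int) (thread_count : Int) (conn_count : Int), Dom_even_distribution rps machine_count thread_count conn_count → Pre_even_distribution rps machine_count thread_count conn_count → Spec_even_distribution rps machine_count thread_count conn_count (even_distribution rps machine_count thread_count conn_count)

-- ===== LEMMAS AND PROOFS =====

-- Proof-side closed form both ports are reduced to: machine i gets t//m, plus 1 iff i < t % m.
def pvFormula (t : Int) (m : Int) : List Int :=
  (PySem.List.pyRange 0 m 1).map (fun i => PySem.Int.floordiv t m + (if i < PySem.Int.mod t m then 1 else 0))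

-- Incrementing the first k positions one at a time equals a single mapIdx with an index test
-- (List.modify past the end is a no-op, so no bound on k is needed).
lemma pvFoldlInc_eq (k : Nat) (l : List Int) :
    (PySem.List.pyRange 0 (k : Int) 1).foldl (fun acc i => acc.modify i.toNat (· + 1)) l
      = l.mapIdx (fun i x => if i < k then x + 1 else x) := by
  induction k with
  | zero =>
      simp only [Int.natCast_zero, PySem.List.pyRange_one_eq_nil (le_refl (0:Int)), List.foldl_nil]
      apply List.ext_getElem <;> simp
  | succ k ih =>
      have h : PySem.List.pyRange 0 ((k : Int) + 1) 1
          = PySem.List.pyRange 0 (k : Int) 1 ++ [(k : Int)] :=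
        PySem.List.pyRange_one_succ_right (by positivity)
      have hcast : ((k : Int) + 1) = ((k + 1 : Nat) : Int) := by push_cast; ring
      rw [← hcast, h, List.foldl_append, ih]
      simp only [List.foldl_cons, List.foldl_nil, Int.toNat_natCast]
      apply List.ext_getElem
      · simp
      · intro i h1 h2
        simp only [List.getElem_modify, List.getElem_mapIdx]
        rcases Nat.lt_trichotomy i k with hik | hik | hik
        · simp [Nat.ne_of_gt hik, hik, Nat.lt_succ_of_lt hik]
        · simp [hik]
        · simp [Nat.ne_of_lt hik, Nat.not_lt.mpr (Nat.le_of_lt hik),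
                Nat.not_lt.mpr (Nat.succ_le_of_lt hik)]

lemma pvDistA_eq_formula (t m : Int) (hm : m ≠ 0) : pvDistA t m = pvFormula t m := by
  unfold pvDistA pvFormula
  rcases lt_or_gt_of_ne hm with hneg | hpos
  · have h1 : PySem.List.pyRange 0 m 1 = [] :=
      PySem.List.pyRange_one_eq_nil (le_of_lt hneg)
    have h2 : PySem.List.pyRange 0 (PySem.Int.mod t m) 1 = [] :=
      PySem.List.pyRange_one_eq_nil (PySem.Int.mod_neg_bounds t hneg).2
    simp [h1, h2]
  · have hr0 : 0 ≤ PySem.Int.mod t m := PySem.Int.mod_nonneg t hpos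
    have hrk : PySem.Int.mod t m = ((PySem.Int.mod t m).toNat : Int) := (Int.toNat_of_nonneg hr0).symm
    rw [hrk, pvFoldlInc_eq]
    apply List.ext_getElem
    · simp
    · intro i h1 h2
      simp only [List.getElem_mapIdx, List.getElem_map, PySem.List.getElem_pyRange_one]
      have : ((i : Int) < PySem.Int.mod t m) ↔ (i < (PySem.Int.mod t m).toNat) := by omega
      split_ifs with hlt hlt' hlt' <;> simp_all <;> omega

-- One greedy step: giving the first of n+1 machines the ceiling of the average and distributing
-- the rest over n machines yields exactly the closed form for n+1 machines.
lemma pvFormula_peel (t : Int) (n : Nat) :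
    (-(PySem.Int.floordiv (-t) ((n : Int) + 1)))
      :: pvFormula (t - (-(PySem.Int.floordiv (-t) ((n : Int) + 1)))) (n : Int)
    = pvFormula t ((n : Int) + 1) := by
  set N : Int := (n : Int) + 1 with hNdef
  have hN : (0:Int) < N := by positivity
  set q : Int := PySem.Int.floordiv t N with hq
  set r : Int := PySem.Int.mod t N with hr
  have hqr : q * N + r = t := PySem.Int.floordiv_mul_add_mod t N
  have hr0 : 0 ≤ r := PySem.Int.mod_nonneg t hN
  have hrN : r < N := PySem.Int.mod_lt t hN
  have hhead : -(PySem.Int.floordiv (-t) N) = q + (if 0 < r then 1 else 0) := by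
    rw [PySem.Int.neg_floordiv_neg_eq_iff_of_pos hN]
    constructor
    · split_ifs with h0r
      · have : (q + 1 - 1) * N = q * N := by ring
        omega
      · have : (q + 0 - 1) * N = q * N - N := by ring
        omega
    · split_ifs with h0r
      · have : (q + 1) * N = q * N + N := by ring
        omega
      · have : (q + 0) * N = q * N := by ring
        omega
  rw [hhead]
  conv_rhs => rw [pvFormula, PySem.List.pyRange_one_cons hN, List.map_cons]
  rw [← hq, ← hr]
  congr 1
  -- head components are definitionally equal; only the tails remain
  rcases Nat.eq_zero_or_pos n with hn0 | hnpos
  · subst hn0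
    have h1 : PySem.List.pyRange 0 (0:Int) 1 = [] := PySem.List.pyRange_one_eq_nil (le_refl 0)
    have h2 : PySem.List.pyRange 1 N 1 = [] := by
      apply PySem.List.pyRange_one_eq_nil; omega
    simp [pvFormula, h1, h2]
  · have hnZ : (0:Int) < (n : Int) := by exact_mod_cast hnpos
    set t2 : Int := t - (q + (if 0 < r then 1 else 0)) with ht2
    set q2 : Int := PySem.Int.floordiv t2 (n : Int) with hq2
    set r2 : Int := PySem.Int.mod t2 (n : Int) with hr2
    have hqr2 : q2 * (n : Int) + r2 = t2 := PySem.Int.floordiv_mul_add_mod _ _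
    have hr20 : 0 ≤ r2 := PySem.Int.mod_nonneg _ hnZ
    have hr2n : r2 < (n : Int) := PySem.Int.mod_lt _ hnZ
    have e1 : q * (n : Int) + (if 0 < r then r - 1 else 0) = t2 := by
      have hqN : q * N = q * (n : Int) + q := by rw [hNdef]; ring
      rw [ht2]; split_ifs with h0r <;> omega
    have hdiff : (q2 - q) * (n : Int) = (if 0 < r then r - 1 else 0) - r2 := by
      have : (q2 - q) * (n:Int) = q2 * (n:Int) - q * (n:Int) := by ring
      omega
    have hb : 0 ≤ (if 0 < r then r - 1 else 0) ∧ (if 0 < r then r - 1 else 0) < (n : Int) := by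
      split_ifs <;> omega
    have hq2q : q2 = q := by
      by_contra hne
      rcases lt_or_gt_of_ne hne with hlt | hgt
      · have h1 : (q2 - q) * (n:Int) ≤ -1 * (n:Int) :=
          mul_le_mul_of_nonneg_right (by omega) (le_of_lt hnZ)
        have h2 : -1 * (n:Int) = -(n:Int) := by ring
        omega
      · have h1 : 1 * (n:Int) ≤ (q2 - q) * (n:Int) :=
          mul_le_mul_of_nonneg_right (by omega) (le_of_lt hnZ)
        have h2 : 1 * (n:Int) = (n:Int) := by ring
        omega
    have hr2e : r2 = (if 0 < r then r - 1 else 0) := by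
      rw [hq2q] at hdiff
      have : (q - q) * (n:Int) = 0 := by ring
      omega
    -- both tails are maps over List.range n; compare pointwise
    rw [pvFormula, ← hq2, ← hr2, PySem.List.pyRange_one, PySem.List.pyRange_one,
        List.map_map, List.map_map]
    have hl1 : ((n : Int) - 0).toNat = n := by omega
    have hl2 : (N - (0 + 1)).toNat = n := by omega
    rw [hl1, hl2]
    apply List.map_congr_left
    intro k hk
    have hk' : k < n := List.mem_range.mp hk
    simp only [Function.comp_apply]
    rw [hq2q, hr2e]
    split_ifs <;> omega

-- The greedy loop, run with n machines left, appends exactly the closed form for (t, n).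
lemma pvShareLoop_eq_formula (n : Nat) : ∀ (t : Int) (acc : List Int),
    pvShareLoop t (n : Int) acc = acc ++ pvFormula t (n : Int) := by
  induction n with
  | zero =>
      intro t acc
      rw [pvShareLoop]
      simp [pvFormula, PySem.List.pyRange_one_eq_nil (le_refl (0:Int))]
  | succ n ih =>
      intro t acc
      have hc : ((n + 1 : Nat) : Int) = (n : Int) + 1 := by push_cast; ring
      have hN : (0:Int) < ((n + 1 : Nat) : Int) := by positivity
      rw [pvShareLoop, dif_pos hN]
      simp only [hc]
      have hc2 : (n : Int) + 1 - 1 = ((n : Nat) : Int) := by ring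
      rw [hc2, ih, List.append_assoc, List.singleton_append, pvFormula_peel]

lemma pvShareLoop_eq_formula' (t m : Int) (hm : m ≠ 0) :
    pvShareLoop t m [] = pvFormula t m := by
  rcases lt_or_gt_of_ne hm with hneg | hpos
  · rw [pvShareLoop, dif_neg (by omega)]
    simp [pvFormula, PySem.List.pyRange_one_eq_nil (le_of_lt hneg)]
  · have : m = ((m.toNat : Nat) : Int) := by omega
    rw [this, pvShareLoop_eq_formula m.toNat t [], List.nil_append]

-- ===== VERDICT (by name: the statement is the Claim_ definition above) =====
theorem even_distribution_spec : Claim_equal_even_distribution := by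
  intro rps m t c _ hpre
  unfold Spec_even_distribution even_distribution even_distribution_alt
  rw [pvDistA_eq_formula rps m hpre, pvDistA_eq_formula t m hpre, pvDistA_eq_formula c m hpre,
      pvShareLoop_eq_formula' rps m hpre, pvShareLoop_eq_formula' t m hpre,
      pvShareLoop_eq_formula' c m hpre]
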